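-- pv_equiv track=rewrite | github.com/HyperPotatoNeo/attention-matching-rl | src/compaction_env/env.py | _last_n_turns
-- ===== SOURCE A (Python) =====
-- def _last_n_turns(turn_msgs: list[dict], n: int) -> list[dict]:
--     """Return the messages belonging to the last *n* turns.
--
--     A "turn" starts at each ``user`` message and includes all subsequent
--     non-``user`` messages (assistant replies, tool responses, etc.).
--     This correctly handles tool-calling envs where each turn has 3+
--     messages instead of the simple user/assistant pair.
--     """
--     if n <= 0:
--         return []
--     # Walk backwards, counting user messages as turn boundaries.
--     count = 0
--     cut = len(turn_msgs)
--     for i in range(len(turn_msgs) - 1, -1, -1):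
--         if turn_msgs[i].get("role") == "user":
--             count += 1
--             if count >= n:
--                 cut = i
--                 break
--     return turn_msgs[cut:]
-- ===== SOURCE B (Python) =====
-- def _last_n_turns(turn_msgs: list[dict], n: int) -> list[dict]:
--     """Return the messages belonging to the last *n* turns.
--
--     Forward scan: collect the index of every 'user' message (turn start),
--     then slice from the n-th last start; [] if fewer than n turns exist.
--     """
--     if n <= 0:
--         return []
--     starts = []
--     for i in range(len(turn_msgs)):
--         if turn_msgs[i].get("role") == "user":
--             starts.append(i)
--     if len(starts) >= n:
--         return turn_msgs[starts[-n]:]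
--     return []
-- ===== Notes on version B (the rewrite author's own statement) =====
-- stated objective: simpler
-- what changed: Replaces the backward walk with early-exit and mutable cut/count state by a forward scan that builds the list of turn-start indices once and then slices from the n-th last start.
import Mathlib
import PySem

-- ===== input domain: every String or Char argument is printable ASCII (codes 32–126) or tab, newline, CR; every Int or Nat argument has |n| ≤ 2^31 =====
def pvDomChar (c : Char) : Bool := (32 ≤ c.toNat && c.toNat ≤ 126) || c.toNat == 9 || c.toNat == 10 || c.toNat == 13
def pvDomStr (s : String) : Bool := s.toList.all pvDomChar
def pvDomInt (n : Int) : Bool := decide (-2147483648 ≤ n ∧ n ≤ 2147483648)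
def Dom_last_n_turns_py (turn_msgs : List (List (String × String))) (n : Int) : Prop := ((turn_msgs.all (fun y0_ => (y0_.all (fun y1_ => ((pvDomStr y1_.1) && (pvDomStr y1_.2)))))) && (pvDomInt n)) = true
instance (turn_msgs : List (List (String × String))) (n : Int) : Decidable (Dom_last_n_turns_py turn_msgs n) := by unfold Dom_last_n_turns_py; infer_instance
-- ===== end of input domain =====

-- B replaces A's backward walk with early exit by a forward scan collecting the
-- turn-start indices once, then slicing from the n-th last start (objective: simpler).

-- ===== PORT A =====
-- the backward loop: `for i in range(len(turn_msgs)-1, -1, -1)` with break;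
-- argument `i+1` counts the indices still to visit (descending); dict.get("role")
-- on the association list is first-match lookup (List.lookup).
def aGo (msgs : List (List (String × String))) (n : Int) : Nat → Int → Nat
  | 0, _ => msgs.length
  | j+1, count =>
    if (PySem.List.pyGetD msgs (j : Int) []).lookup "role" == some "user" then
      (if n ≤ count + 1 then j else aGo msgs n j (count + 1))
    else aGo msgs n j count

def last_n_turns_py (turn_msgs : List (List (String × String))) (n : Int) : List (List (String × String)) :=
  if n ≤ 0 then []
  else PySem.List.slice turn_msgs (some ((aGo turn_msgs n turn_msgs.length 0 : Nat) : Int)) none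

-- ===== PORT B =====
-- forward scan appending each 'user' index into `starts`
def bStarts (msgs : List (List (String × String))) : List Int :=
  (PySem.List.pyRange 0 msgs.length 1).foldl
    (fun acc i => if (PySem.List.pyGetD msgs i []).lookup "role" == some "user" then acc ++ [i] else acc) []

def last_n_turns_py_alt (turn_msgs : List (List (String × String))) (n : Int) : List (List (String × String)) :=
  if n ≤ 0 then []
  else
    if n ≤ ((bStarts turn_msgs).length : Int) then
      match PySem.List.pyGet? (bStarts turn_msgs) (-n) with
      | some cut => PySem.List.slice turn_msgs (some cut) none
      | none => []
    else []

-- ===== PRECONDITION & SPEC =====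
def Spec_last_n_turns_py (turn_msgs : List (List (String × String))) (n : Int) (out : List (List (String × String))) : Prop := out = last_n_turns_py_alt turn_msgs n
instance (turn_msgs : List (List (String × String))) (n : Int) (out : List (List (String × String))) : Decidable (Spec_last_n_turns_py turn_msgs n out) := by unfold Spec_last_n_turns_py; infer_instance

-- ===== CLAIM (what is proved, stated in full; the proofs are below) =====
def Claim_equal_last_n_turns_py : Prop := ∀ (turn_msgs : List (List (String × String))) (n : Int), Dom_last_n_turns_py turn_msgs n → Spec_last_n_turns_py turn_msgs n (last_n_turns_py turn_msgs n)

-- ===== LEMMAS AND PROOFS =====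
-- 'message at index j starts a turn'
def isUser (msgs : List (List (String × String))) (j : Nat) : Bool :=
  (PySem.List.pyGetD msgs (j : Int) []).lookup "role" == some "user"

-- the user indices among 0..i-1, ascending
def us (msgs : List (List (String × String))) (i : Nat) : List Nat :=
  (List.range i).filter (isUser msgs)

lemma us_succ (msgs : List (List (String × String))) (j : Nat) :
    us msgs (j+1) = us msgs j ++ (if isUser msgs j then [j] else []) := by
  simp [us, List.range_succ, List.filter_append]
  split <;> simp_all

lemma aGo_eq (msgs : List (List (String × String))) (n : Int) :
    ∀ (i : Nat) (c : Int), 0 ≤ c → c < n →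
      aGo msgs n i c =
        (if n - c ≤ ((us msgs i).length : Int)
         then (us msgs i).getD ((us msgs i).length - (n - c).toNat) msgs.length
         else msgs.length) := by
  intro i
  induction i with
  | zero =>
    intro c hc0 hcn
    simp [aGo, us]
  | succ j ih =>
    intro c hc0 hcn
    rw [show aGo msgs n (j+1) c =
        (if (PySem.List.pyGetD msgs (j : Int) []).lookup "role" == some "user" then
          (if n ≤ c + 1 then j else aGo msgs n j (c + 1))
        else aGo msgs n j c) from rfl]
    rw [us_succ]
    by_cases hu : isUser msgs j
    · simp only [isUser] at hu
      rw [if_pos hu]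
      simp only [isUser, hu, if_true]
      by_cases hb : n ≤ c + 1
      · -- break: n = c + 1
        have hn : n = c + 1 := by omega
        rw [if_pos hb, if_pos]
        · have : (us msgs j ++ [j]).length - (n - c).toNat = (us msgs j).length := by
            simp [hn]
          rw [this, List.getD_eq_getElem?_getD, List.getElem?_concat_length]
          simp
        · simp [hn]
      · rw [if_neg hb, ih (c+1) (by omega) (by omega)]
        have hlen : ((us msgs j ++ [j]).length : Int) = (us msgs j).length + 1 := by
          simp
        by_cases hc2 : n - (c+1) ≤ ((us msgs j).length : Int)
        · rw [if_pos hc2, if_pos (by omega)]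
          have h1 : (n - c).toNat = (n - (c+1)).toNat + 1 := by omega
          have hidx : (us msgs j ++ [j]).length - (n - c).toNat
              = (us msgs j).length - (n - (c+1)).toNat := by
            simp [h1]
          rw [hidx]
          have hlt : (us msgs j).length - (n - (c+1)).toNat < (us msgs j).length := by
            omega
          rw [List.getD_eq_getElem?_getD, List.getD_eq_getElem?_getD,
              List.getElem?_append_left hlt]
        · rw [if_neg hc2, if_neg (by simp; omega)]
    · simp only [isUser] at hu
      have hz : isUser msgs j = false := by
        simp only [isUser]; exact eq_false_of_ne_true hu
      rw [if_neg (by simpa using hu), ih c hc0 hcn, hz]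
      simp

lemma bStarts_eq (msgs : List (List (String × String))) :
    bStarts msgs = (us msgs msgs.length).map Int.ofNat := by
  unfold bStarts us
  rw [PySem.List.pyRange_one, PySem.List.foldl_append_if, List.filter_map]
  simp only [List.nil_append, Int.sub_zero, Int.toNat_natCast, zero_add, List.map_id']
  rfl

-- ===== VERDICT (by name: the statement is the Claim_ definition above) =====
theorem last_n_turns_py_spec : Claim_equal_last_n_turns_py := by
  intro msgs n _
  unfold Spec_last_n_turns_py last_n_turns_py last_n_turns_py_alt
  by_cases h0 : n ≤ 0
  · simp [h0]
  · rw [if_neg h0, if_neg h0]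
    rw [aGo_eq msgs n msgs.length 0 le_rfl (by omega), bStarts_eq]
    rw [List.length_map]
    simp only [Int.sub_zero]
    by_cases hc : n ≤ ((us msgs msgs.length).length : Int)
    · rw [if_pos hc, if_pos hc]
      have hidx : (us msgs msgs.length).length - n.toNat < (us msgs msgs.length).length := by
        omega
      have hget : PySem.List.pyGet? ((us msgs msgs.length).map Int.ofNat) (-n)
          = some (Int.ofNat ((us msgs msgs.length)[(us msgs msgs.length).length - n.toNat]'hidx)) := by
        conv_lhs => rw [show n = ((n.toNat : Nat) : Int) from by omega]
        rw [PySem.List.pyGet?_neg_natCast _ _ (by omega) (by rw [List.length_map]; omega)]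
        rw [List.length_map, List.getElem?_map, List.getElem?_eq_getElem hidx]
        rfl
      rw [hget]
      show PySem.List.slice msgs
          (some ((((us msgs msgs.length).getD ((us msgs msgs.length).length - n.toNat) msgs.length : Nat)) : Int)) none
        = PySem.List.slice msgs
          (some (Int.ofNat ((us msgs msgs.length)[(us msgs msgs.length).length - n.toNat]'hidx))) none
      rw [List.getD_eq_getElem _ _ hidx]
      rfl
    · rw [if_neg hc, if_neg hc]
      rw [PySem.List.slice_from_natCast]
      simp
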